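-- pv_equiv track=rewrite | github.com/NoeOnDev/Genetic-algorithm-Dataset | algoritmo.py | cruce_bits
-- ===== SOURCE A (Python) =====
-- def cruce_bits(padre1, padre2, puntos):
--     bin_padre1 = list(bin(int(padre1) & 0xFFFF)[2:].zfill(16))
--     bin_padre2 = list(bin(int(padre2) & 0xFFFF)[2:].zfill(16))
--     hijo = bin_padre1.copy()
--     for i, punto in enumerate(puntos):
--         if i % 2 == 0:
--             hijo[punto:] = bin_padre2[punto:]
--         else:
--             hijo[punto:] = bin_padre1[punto:]
--     return int(''.join(hijo), 2)
-- ===== SOURCE B (Python) =====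
-- def cruce_bits(padre1, padre2, puntos):
--     a = format(int(padre1) & 0xFFFF, '016b')
--     b = format(int(padre2) & 0xFFFF, '016b')
--     hijo = ''
--     corte = 16
--     for i, punto in reversed(list(enumerate(puntos))):
--         fuente = b if i % 2 == 0 else a
--         seg = fuente[punto:corte]
--         hijo = seg + hijo
--         corte -= len(seg)
--     return int(a[:corte] + hijo, 2)
-- ===== Notes on version B (the rewrite author's own statement) =====
-- stated objective: alternative
-- what changed: B builds the child back-to-front in a single reverse pass over the crossover points: each point contributes one slice segment of its source parent (later points win), with a falling cut index, instead of A's forward pass that repeatedly overwrites the suffix of a mutable 16-char list; B uses immutable strings via format() and plain concatenation.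
import Mathlib
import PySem

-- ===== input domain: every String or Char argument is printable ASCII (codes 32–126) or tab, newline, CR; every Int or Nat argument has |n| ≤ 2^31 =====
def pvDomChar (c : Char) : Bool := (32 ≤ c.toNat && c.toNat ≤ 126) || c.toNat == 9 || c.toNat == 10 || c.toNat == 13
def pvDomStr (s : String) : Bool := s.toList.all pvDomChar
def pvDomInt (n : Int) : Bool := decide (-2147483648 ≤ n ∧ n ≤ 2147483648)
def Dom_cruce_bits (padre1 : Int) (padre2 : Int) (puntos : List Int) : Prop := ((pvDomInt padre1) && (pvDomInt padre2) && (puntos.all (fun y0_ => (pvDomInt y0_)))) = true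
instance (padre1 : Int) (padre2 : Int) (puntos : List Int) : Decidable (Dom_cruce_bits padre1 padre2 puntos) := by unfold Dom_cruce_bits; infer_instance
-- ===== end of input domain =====

-- B builds the child back-to-front in ONE reverse pass over the points (each point
-- contributes one segment, later points win), instead of A's forward pass that
-- repeatedly overwrites the suffix of a mutable char list.  Objective: alternative.

-- ===== PORT A =====

-- digit character of a bit value (0 or 1)
def pvDigit (b : Nat) : Char := if b = 1 then '1' else '0'

-- binary digits of n, least-significant first; empty for 0 (helper for bin())
def pvNatBits : Nat → List Char
  | 0 => []
  | n+1 => pvDigit ((n+1) % 2) :: pvNatBits ((n+1) / 2)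
decreasing_by exact Nat.div_lt_self (Nat.succ_pos _) one_lt_two

-- bin(n)[2:] for n ≥ 0 (bin is a builtin; this is its standard digit recursion)
def pvBin (n : Nat) : List Char := if n = 0 then ['0'] else (pvNatBits n).reverse

-- s.zfill(16) for a sign-free digit string: left-pad with '0' to length 16
def pvZfill16 (l : List Char) : List Char := List.replicate (16 - l.length) '0' ++ l

-- Python's effective start index of the slice l[punto:] for a list of length 16
-- (negative counts from the end, clamped to [0, 16])
def pvEff (p : Int) : Nat := if p < 0 then (16 + p).toNat else min p.toNat 16

-- the for-loop of A: 'for i, punto in enumerate(puntos)' with the slice assignment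
-- hijo[punto:] = src[punto:]; hijo and both parent lists always have length 16, so
-- slice assignment is exactly take e ++ drop e at the effective index e (exact here)
def pvLoopA (bp1 bp2 : List Char) : Nat → List Char → List Int → List Char
  | _, hijo, [] => hijo
  | i, hijo, punto :: rest =>
      let e := pvEff punto
      pvLoopA bp1 bp2 (i+1)
        (if i % 2 == 0 then hijo.take e ++ bp2.drop e else hijo.take e ++ bp1.drop e) rest

-- int(s, 2): base-2 fold, ported by hand; exact on '0'/'1' strings, which both
-- programs always feed it (shared: both Pythons call the same builtin)
def pvBinVal (l : List Char) : Int :=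
  l.foldl (fun acc c => acc * 2 + (if c == '1' then 1 else 0)) 0

def cruce_bits (padre1 : Int) (padre2 : Int) (puntos : List Int) : Int :=
  -- int(padreN) & 0xFFFF is nonnegative < 2^16, so .toNat is exact
  let bp1 := pvZfill16 (pvBin (PySem.Int.band padre1 65535).toNat)
  let bp2 := pvZfill16 (pvBin (PySem.Int.band padre2 65535).toNat)
  pvBinVal (pvLoopA bp1 bp2 0 bp1 puntos)

-- ===== PORT B =====

-- the low k binary digits of h, least-significant first (model of binary formatting)
def pvBits : Nat → Nat → List Char
  | 0, _ => []
  | k+1, h => pvDigit (h % 2) :: pvBits k (h / 2)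

-- format(n, '016b'): the 16 binary digits of n, MSB first (builtin, ported by its
-- contract; exact for n < 2^16, which both arguments are)
def pvFormat16 (n : Nat) : List Char := (pvBits 16 n).reverse

-- B's loop: 'for i, punto in reversed(list(enumerate(puntos)))' carrying the pair
-- (hijo, corte); each step prepends the segment fuente[punto:corte] and lowers corte
def pvLoopB (a b : List Char) (pairs : List (Int × Int)) : List Char × Int :=
  pairs.foldl
    (fun st ip =>
      let fuente := if PySem.Int.mod ip.1 2 == 0 then b else a
      let seg := PySem.List.slice fuente (some ip.2) (some st.2)
      (seg ++ st.1, st.2 - seg.length))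
    ([], 16)

def cruce_bits_alt (padre1 : Int) (padre2 : Int) (puntos : List Int) : Int :=
  let a := pvFormat16 (PySem.Int.band padre1 65535).toNat
  let b := pvFormat16 (PySem.Int.band padre2 65535).toNat
  let st := pvLoopB a b ((PySem.List.enumerate puntos).reverse)
  pvBinVal (PySem.List.slice a none (some st.2) ++ st.1)

-- ===== PRECONDITION & SPEC =====
def Spec_cruce_bits (padre1 : Int) (padre2 : Int) (puntos : List Int) (out : Int) : Prop := out = cruce_bits_alt padre1 padre2 puntos
instance (padre1 : Int) (padre2 : Int) (puntos : List Int) (out : Int) : Decidable (Spec_cruce_bits padre1 padre2 puntos out) := by unfold Spec_cruce_bits; infer_instance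

-- ===== CLAIM (what is proved, stated in full; the proofs are below) =====
def Claim_equal_cruce_bits : Prop := ∀ (padre1 : Int) (padre2 : Int) (puntos : List Int), Dom_cruce_bits padre1 padre2 puntos → Spec_cruce_bits padre1 padre2 puntos (cruce_bits padre1 padre2 puntos)

-- ===== LEMMAS AND PROOFS =====

theorem pvBits_length (k h : Nat) : (pvBits k h).length = k := by
  induction k generalizing h with
  | zero => rfl
  | succ k ih => simp [pvBits, ih]

theorem pvEff_le (p : Int) : pvEff p ≤ 16 := by
  unfold pvEff; split <;> omega

-- Python's slice clamp on a length-16 list is pvEff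
theorem pv_clamp_eff (p : Int) : PySem.List.clampIdx 16 p = pvEff p := by
  unfold PySem.List.clampIdx pvEff
  split_ifs <;> omega

-- the slice fuente[punto:corte] for 0 ≤ corte ≤ 16 on a length-16 list
theorem pv_slice_eq (src : List Char) (hs : src.length = 16) (x c : Int)
    (hc0 : 0 ≤ c) (hc16 : c ≤ 16) :
    PySem.List.slice src (some x) (some c)
      = (src.drop (pvEff x)).take (c.toNat - pvEff x) := by
  simp only [PySem.List.slice, hs]
  have e1 : PySem.List.clampIdx 16 x = pvEff x := pv_clamp_eff x
  have e2 : PySem.List.clampIdx 16 c = c.toNat := by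
    unfold PySem.List.clampIdx; split_ifs <;> omega
  rw [e1, e2]

-- peel the LAST processed pair of B's reverse fold (the first crossover point)
theorem pvLoopB_snoc (a b : List Char) (pairs : List (Int × Int)) (q : Int × Int) :
    pvLoopB a b (pairs ++ [q])
      = ((PySem.List.slice (if PySem.Int.mod q.1 2 == 0 then b else a)
            (some q.2) (some (pvLoopB a b pairs).2)) ++ (pvLoopB a b pairs).1,
         (pvLoopB a b pairs).2
           - ((PySem.List.slice (if PySem.Int.mod q.1 2 == 0 then b else a)
                (some q.2) (some (pvLoopB a b pairs).2)).length : Int)) := by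
  unfold pvLoopB
  rw [List.foldl_append]
  simp

-- state invariant of B's fold, and the key correspondence with A's forward loop:
-- A's result after the remaining points equals 'current child'.take corte ++ hijo
theorem pv_main (bp1 bp2 : List Char) (h1 : bp1.length = 16) (h2 : bp2.length = 16)
    (ops : List Int) : ∀ (i0 : Nat) (h : List Char), h.length = 16 →
    (0 ≤ (pvLoopB bp1 bp2 ((PySem.List.enumerate ops (i0:Int)).reverse)).2 ∧
     (pvLoopB bp1 bp2 ((PySem.List.enumerate ops (i0:Int)).reverse)).2 ≤ 16) ∧
    pvLoopA bp1 bp2 i0 h ops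
      = h.take (pvLoopB bp1 bp2 ((PySem.List.enumerate ops (i0:Int)).reverse)).2.toNat
        ++ (pvLoopB bp1 bp2 ((PySem.List.enumerate ops (i0:Int)).reverse)).1 := by
  induction ops with
  | nil =>
    intro i0 h hh
    refine ⟨⟨by norm_num [pvLoopB, PySem.List.enumerate],
            by norm_num [pvLoopB, PySem.List.enumerate]⟩, ?_⟩
    simp only [pvLoopA, pvLoopB, PySem.List.enumerate, List.reverse_nil, List.foldl_nil]
    have h16 : ((16:Int)).toNat = 16 := rfl
    rw [h16, List.take_of_length_le (by omega)]
    simp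
  | cons x rest ih =>
    intro i0 h hh
    have he : pvEff x ≤ 16 := pvEff_le x
    -- the source parent is the same on both sides
    have hpar : ((PySem.Int.mod ((i0:Int)) 2 == 0)) = (i0 % 2 == 0) := by
      have hm : PySem.Int.mod (i0:Int) 2 = ((i0 % 2 : Nat) : Int) := by
        exact_mod_cast PySem.Int.mod_natCast i0 2
      rw [hm]
      rcases Nat.mod_two_eq_zero_or_one i0 with hp | hp <;> simp [hp]
    set src : List Char := if i0 % 2 == 0 then bp2 else bp1 with hsrc
    have hsl : src.length = 16 := by rw [hsrc]; split <;> assumption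
    -- A's one step keeps the child 16 long
    have hh' : (h.take (pvEff x) ++ src.drop (pvEff x)).length = 16 := by
      simp [hh, hsl]; omega
    obtain ⟨⟨hc0, hc16⟩, ihe⟩ := ih (i0 + 1) (h.take (pvEff x) ++ src.drop (pvEff x)) hh'
    have hcast : (((i0 + 1 : Nat)) : Int) = (i0 : Int) + 1 := by push_cast; ring
    rw [hcast] at hc0 hc16 ihe
    set st := pvLoopB bp1 bp2 ((PySem.List.enumerate rest ((i0:Int)+1)).reverse) with hst
    -- unfold one enumerate step and one fold step of B
    have henum : (PySem.List.enumerate (x :: rest) (i0:Int)).reverse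
        = (PySem.List.enumerate rest ((i0:Int)+1)).reverse ++ [((i0:Int), x)] := by
      rw [PySem.List.enumerate_cons]; simp
    have hB := pvLoopB_snoc bp1 bp2 ((PySem.List.enumerate rest ((i0:Int)+1)).reverse) ((i0:Int), x)
    rw [← henum, ← hst] at hB
    have hseg : PySem.List.slice (if PySem.Int.mod ((i0:Int)) 2 == 0 then bp2 else bp1)
        (some x) (some st.2)
        = (src.drop (pvEff x)).take (st.2.toNat - pvEff x) := by
      rw [hpar, ← hsrc, pv_slice_eq src hsl x st.2 hc0 hc16]
    simp only [hseg] at hB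
    have hseglen : ((src.drop (pvEff x)).take (st.2.toNat - pvEff x)).length
        = st.2.toNat - pvEff x := by
      simp [hsl]; omega
    constructor
    · rw [hB]
      dsimp only
      rw [hseglen]
      constructor <;> omega
    · show pvLoopA bp1 bp2 (i0+1)
        (if i0 % 2 == 0 then h.take (pvEff x) ++ bp2.drop (pvEff x)
         else h.take (pvEff x) ++ bp1.drop (pvEff x)) rest = _
      have hsw : (if i0 % 2 == 0 then h.take (pvEff x) ++ bp2.drop (pvEff x)
          else h.take (pvEff x) ++ bp1.drop (pvEff x))
          = h.take (pvEff x) ++ src.drop (pvEff x) := by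
        rw [hsrc]; split <;> rfl
      rw [hsw, ihe, hB]
      dsimp only
      -- (h.take e ++ src.drop e).take cN ++ t = h.take newC ++ seg ++ t
      have htk : (h.take (pvEff x) ++ src.drop (pvEff x)).take st.2.toNat
          = h.take (min st.2.toNat (pvEff x))
            ++ (src.drop (pvEff x)).take (st.2.toNat - pvEff x) := by
        rw [List.take_append]
        have hlen : (h.take (pvEff x)).length = pvEff x := by simp [hh]; omega
        rw [List.take_take, hlen]
      rw [htk]
      have hnc : (st.2 - (((src.drop (pvEff x)).take (st.2.toNat - pvEff x)).length : Int)).toNat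
          = min st.2.toNat (pvEff x) := by
        rw [hseglen]; omega
      rw [hnc, List.append_assoc]

-- int(p) & 0xFFFF is a nonnegative 16-bit value
theorem pv_band_bounds (a : Int) :
    0 ≤ PySem.Int.band a 65535 ∧ PySem.Int.band a 65535 < 65536 := by
  unfold PySem.Int.band
  by_cases h1 : 0 ≤ a
  · rw [if_pos h1, if_pos (by norm_num : (0:Int) ≤ 65535)]
    have hle : a.toNat &&& (65535:Int).toNat ≤ (65535:Int).toNat := Nat.and_le_right
    have h9 : ((65535:Int).toNat) = 65535 := rfl
    refine ⟨Int.natCast_nonneg _, ?_⟩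
    omega
  · rw [if_neg h1, if_pos (by norm_num : (0:Int) ≤ 65535)]
    have h9 : ((65535:Int).toNat) = 65535 := rfl
    refine ⟨Int.natCast_nonneg _, ?_⟩
    omega

-- zfill(16) of bin(n) is the 16-bit string of n (MSB first)
theorem pv_natbits_pad (k : Nat) : ∀ n : Nat, n < 2^k →
    pvBits k n = pvNatBits n ++ List.replicate (k - (pvNatBits n).length) '0' := by
  induction k with
  | zero =>
    intro n hn
    interval_cases n
    simp [pvBits, pvNatBits]
  | succ k ih =>
    intro n hn
    match n with
    | 0 =>
      have h0 : pvBits k 0 = List.replicate k '0' := by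
        have h8 := ih 0 (Nat.two_pow_pos k)
        simpa [pvNatBits] using h8
      simp [pvBits, pvNatBits, pvDigit, h0, List.replicate_succ]
    | m+1 =>
      have hd : (m+1)/2 < 2^k := by
        apply Nat.div_lt_of_lt_mul
        rw [← pow_succ']
        exact hn
      have ihd := ih ((m+1)/2) hd
      show pvDigit ((m+1) % 2) :: pvBits k ((m+1)/2) = _
      rw [pvNatBits, ihd]
      simp only [List.cons_append, List.length_cons, Nat.succ_sub_succ]

theorem pv_zfill_bin (n : Nat) (hn : n < 65536) :
    pvZfill16 (pvBin n) = pvFormat16 n := by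
  unfold pvFormat16
  by_cases h0 : n = 0
  · subst h0; rfl
  · have hp := pv_natbits_pad 16 n hn
    unfold pvZfill16 pvBin
    rw [if_neg h0, hp]
    simp [List.reverse_append, List.reverse_replicate]

-- ===== VERDICT (by name: the statement is the Claim_ definition above) =====
theorem cruce_bits_spec : Claim_equal_cruce_bits := by
  intro padre1 padre2 puntos _dom
  unfold Spec_cruce_bits
  simp only [cruce_bits, cruce_bits_alt]
  obtain ⟨hn1, hb1⟩ := pv_band_bounds padre1
  obtain ⟨hn2, hb2⟩ := pv_band_bounds padre2
  set n1 := (PySem.Int.band padre1 65535).toNat with hdef1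
  set n2 := (PySem.Int.band padre2 65535).toNat with hdef2
  have hl1 : n1 < 65536 := by omega
  have hl2 : n2 < 65536 := by omega
  rw [pv_zfill_bin n1 hl1, pv_zfill_bin n2 hl2]
  have hf1 : (pvFormat16 n1).length = 16 := by
    unfold pvFormat16; simp [pvBits_length]
  have hf2 : (pvFormat16 n2).length = 16 := by
    unfold pvFormat16; simp [pvBits_length]
  obtain ⟨⟨hc0, hc16⟩, hmain⟩ :=
    pv_main (pvFormat16 n1) (pvFormat16 n2) hf1 hf2 puntos 0 (pvFormat16 n1) hf1
  rw [hmain]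
  congr 1
  -- a[:corte] is take corte
  set st := pvLoopB (pvFormat16 n1) (pvFormat16 n2)
      ((PySem.List.enumerate puntos ((0:Nat):Int)).reverse) with hst
  have : PySem.List.slice (pvFormat16 n1) none (some st.2)
      = (pvFormat16 n1).take st.2.toNat := by
    unfold PySem.List.slice PySem.List.clampIdx
    rw [hf1]
    have hb : ¬ st.2 < 0 := by omega
    simp only [hb, if_false]
    have : min st.2.toNat 16 = st.2.toNat := by omega
    simp [this]
  simp only [Int.natCast_zero] at hst this ⊢
  rw [← hst, this]
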